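-- pv_equiv track=rewrite | github.com/proompteng/lab | services/torghut/app/trading/discovery/hypothesis_cards.py | _mechanism_from_claims
-- ===== SOURCE A (Python) =====
-- from typing import Any, Literal, Mapping, Sequence, cast
--
-- def _string(value: Any) -> str:
--     return str(value or "").strip()
--
-- def _claim_text(claim: Mapping[str, Any]) -> str:
--     return _string(claim.get("claim_text")) or _string(claim.get("claim"))
--
-- def _mechanism_from_claims(claims: Sequence[Mapping[str, Any]]) -> str:
--     for claim in claims:
--         text = _claim_text(claim)
--         claim_type = _string(claim.get("claim_type"))
--         if text and claim_type in {
--             "signal_mechanism",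
--             "feature_recipe",
--             "normalization_rule",
--         }:
--             return text
--     for claim in claims:
--         text = _claim_text(claim)
--         if text:
--             return text
--     return "Whitepaper-derived market mechanism"
-- ===== SOURCE B (Python) =====
-- from typing import Any, Mapping, Sequence
--
-- _PRIORITY = {"signal_mechanism", "feature_recipe", "normalization_rule"}
--
-- def _string(value: Any) -> str:
--     return str(value or "").strip()
--
-- def _claim_text(claim: Mapping[str, Any]) -> str:
--     return _string(claim.get("claim_text")) or _string(claim.get("claim"))
--
-- def _mechanism_from_claims(claims: Sequence[Mapping[str, Any]]) -> str:
--     fallback = None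
--     for claim in claims:
--         text = _claim_text(claim)
--         if text and _string(claim.get("claim_type")) in _PRIORITY:
--             return text
--         if fallback is None and text:
--             fallback = text
--     return fallback if fallback is not None else "Whitepaper-derived market mechanism"
-- ===== Notes on version B (the rewrite author's own statement) =====
-- stated objective: simpler
-- what changed: Replaced A's two sequential scans (one for typed claims, one for any text) with a single pass that returns immediately on a priority-typed claim and remembers the first non-empty text as a fallback.
import Mathlib
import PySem

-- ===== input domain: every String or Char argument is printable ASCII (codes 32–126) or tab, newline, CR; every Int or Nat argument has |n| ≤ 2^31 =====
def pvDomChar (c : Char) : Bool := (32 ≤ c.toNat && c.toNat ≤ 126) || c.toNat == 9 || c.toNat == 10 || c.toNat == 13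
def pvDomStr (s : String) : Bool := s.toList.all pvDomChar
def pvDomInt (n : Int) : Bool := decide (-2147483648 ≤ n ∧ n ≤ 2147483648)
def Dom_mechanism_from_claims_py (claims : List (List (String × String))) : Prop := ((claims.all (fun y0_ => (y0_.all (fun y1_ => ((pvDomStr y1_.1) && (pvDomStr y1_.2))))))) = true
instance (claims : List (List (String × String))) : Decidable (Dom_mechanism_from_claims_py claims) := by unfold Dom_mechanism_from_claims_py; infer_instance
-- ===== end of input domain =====

-- B replaces A's two sequential scans with a single pass keeping a first-text fallback (simpler).


-- ===== PORT A =====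
-- claim.get(k): first match in the association list (none = missing key)
def pvGet (c : List (String × String)) (k : String) : Option String :=
  (c.find? (fun p => p.1 == k)).map (·.2)

-- _string(v): str(v or "").strip() — for an optional string this is strip of getD ""
def pvStr (v : Option String) : String := PySem.Str.strip (v.getD "")

-- _claim_text: _string(claim.get("claim_text")) or _string(claim.get("claim"))
def pvClaimText (c : List (String × String)) : String :=
  let t := pvStr (pvGet c "claim_text")
  if t ≠ "" then t else pvStr (pvGet c "claim")

def pvPrio (s : String) : Bool :=
  s == "signal_mechanism" || s == "feature_recipe" || s == "normalization_rule"

-- A's first loop: return first non-empty text whose claim_type is in the priority set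
def pvLoop1 : List (List (String × String)) → Option String
  | [] => none
  | c :: rest =>
    let text := pvClaimText c
    let ct := pvStr (pvGet c "claim_type")
    if text ≠ "" ∧ pvPrio ct then some text else pvLoop1 rest

-- A's second loop: return first non-empty text
def pvLoop2 : List (List (String × String)) → Option String
  | [] => none
  | c :: rest =>
    let text := pvClaimText c
    if text ≠ "" then some text else pvLoop2 rest

def mechanism_from_claims_py (claims : List (List (String × String))) : String :=
  match pvLoop1 claims with
  | some t => t
  | none =>
    match pvLoop2 claims with
    | some t => t
    | none => "Whitepaper-derived market mechanism"

-- ===== PORT B =====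
-- single pass with a fallback accumulator (B's loop)
def pvBLoop : List (List (String × String)) → Option String → String
  | [], fb => fb.getD "Whitepaper-derived market mechanism"
  | c :: rest, fb =>
    let text := pvClaimText c
    if text ≠ "" ∧ pvPrio (pvStr (pvGet c "claim_type")) then text
    else pvBLoop rest (if fb = none ∧ text ≠ "" then some text else fb)

def mechanism_from_claims_py_alt (claims : List (List (String × String))) : String :=
  pvBLoop claims none

-- ===== PRECONDITION & SPEC =====
def Spec_mechanism_from_claims_py (claims : List (List (String × String))) (out : String) : Prop := out = mechanism_from_claims_py_alt claims
instance (claims : List (List (String × String))) (out : String) : Decidable (Spec_mechanism_from_claims_py claims out) := by unfold Spec_mechanism_from_claims_py; infer_instance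

-- ===== CLAIM (what is proved, stated in full; the proofs are below) =====
def Claim_equal_mechanism_from_claims_py : Prop := ∀ (claims : List (List (String × String))), Dom_mechanism_from_claims_py claims → Spec_mechanism_from_claims_py claims (mechanism_from_claims_py claims)

-- ===== LEMMAS AND PROOFS =====
-- B's loop, for any fallback, equals: first typed hit, else fallback, else first text, else default.
theorem pvBLoop_eq (claims : List (List (String × String))) (fb : Option String) :
    pvBLoop claims fb =
      match pvLoop1 claims with
      | some t => t
      | none =>
        match fb with
        | some f => f
        | none =>
          match pvLoop2 claims with
          | some t => t
          | none => "Whitepaper-derived market mechanism" := by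
  induction claims generalizing fb with
  | nil => cases fb <;> simp [pvBLoop, pvLoop1, pvLoop2, Option.getD]
  | cons c rest ih =>
    simp only [pvBLoop, pvLoop1, pvLoop2]
    by_cases h : pvClaimText c ≠ "" ∧ pvPrio (pvStr (pvGet c "claim_type"))
    · simp [h]
    · simp only [h, if_false, ih]
      cases fb with
      | some f => simp
      | none =>
        by_cases ht : pvClaimText c ≠ ""
        · simp [ht]
        · simp [ht]

-- ===== VERDICT (by name: the statement is the Claim_ definition above) =====
theorem mechanism_from_claims_py_spec : Claim_equal_mechanism_from_claims_py := by
  intro claims _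
  show mechanism_from_claims_py claims = mechanism_from_claims_py_alt claims
  rw [mechanism_from_claims_py_alt, pvBLoop_eq, mechanism_from_claims_py]
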